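-- pv_equiv track=rewrite | github.com/belsouza/exercises_HackerRank | python/print.py | printer
-- ===== SOURCE A (Python) =====
-- def printer( n ):
--
--     cont = 0
--     base = 1
--
--     for i in range(n + 1):
--
--         if(i % base == 0):
--             base = base * 10
--
--         cont = (cont * base) + i
--
--     return cont
-- ===== SOURCE B (Python) =====
-- def printer(n):
--     # Concatenate 0..n by digit-length blocks; each block is combined by
--     # balanced divide-and-conquer instead of one running multiply-per-number.
--     if n < 0:
--         return 0
--     total = 0
--     lo = 0
--     for d in range(1, len(str(n)) + 1):
--         hi = min(n, 10 ** d - 1)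
--         total = total * 10 ** (d * (hi - lo + 1)) + _chunk(lo, hi, d)
--         lo = 10 ** d
--     return total
--
--
-- def _chunk(a, b, d):
--     # concatenation of the d-digit-wide numbers a..b (a <= b)
--     if a == b:
--         return a
--     m = (a + b) // 2
--     return _chunk(a, m, d) * 10 ** (d * (b - m)) + _chunk(m + 1, b, d)
-- ===== Notes on version B (the rewrite author's own statement) =====
-- stated objective: faster
-- what changed: A multiplies the big accumulator by the base and adds once per number while tracking digit boundaries with i % base; B builds the concatenation by digit-length blocks, combining each block with balanced divide-and-conquer multiplication, so the big-integer work is balanced instead of linear-chain.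
import Mathlib
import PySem

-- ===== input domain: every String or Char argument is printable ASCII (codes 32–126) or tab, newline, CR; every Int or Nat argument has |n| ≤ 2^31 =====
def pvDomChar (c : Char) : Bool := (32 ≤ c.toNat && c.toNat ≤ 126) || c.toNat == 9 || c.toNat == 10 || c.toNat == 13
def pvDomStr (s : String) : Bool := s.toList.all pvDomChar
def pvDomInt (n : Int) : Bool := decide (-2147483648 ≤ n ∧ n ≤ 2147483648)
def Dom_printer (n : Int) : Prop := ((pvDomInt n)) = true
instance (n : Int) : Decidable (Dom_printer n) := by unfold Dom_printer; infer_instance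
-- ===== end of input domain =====

-- B concatenates 0..n by digit-length blocks combined with balanced divide-and-conquer,
-- instead of A's one big-integer multiply-and-add per number; measured faster.

-- ===== PORT A =====
def printer (n : Int) : Int :=
  ((PySem.List.pyRange 0 (n + 1) 1).foldl
    (fun (s : Int × Int) i =>
      let base : Int := if PySem.Int.mod i s.2 = 0 then s.2 * 10 else s.2
      (s.1 * base + i, base))
    ((0 : Int), (1 : Int))).1

-- ===== PORT B =====
-- _chunk(a, b, d): Python tests 'a == b'; the port's 'b ≤ a' guard only makes the
-- (diverging-in-Python) case a > b total — it coincides with Python whenever a ≤ b.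
def pchunk (a b d : Int) : Int :=
  if b ≤ a then a
  else
    let m := PySem.Int.floordiv (a + b) 2
    pchunk a m d * 10 ^ (d * (b - m)).toNat + pchunk (m + 1) b d
termination_by (b - a).toNat
decreasing_by
  · have h2 : (0:Int) < 2 := by omega
    rw [PySem.Int.floordiv_eq_ediv_of_pos h2]
    omega
  · have h2 : (0:Int) < 2 := by omega
    rw [PySem.Int.floordiv_eq_ediv_of_pos h2]
    omega

def printer_alt (n : Int) : Int :=
  if n < 0 then 0
  else
    ((PySem.List.pyRange 1 (PySem.Str.len (PySem.Int.toStr n) + 1) 1).foldl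
      (fun (s : Int × Int) d =>
        let hi := min n (10 ^ d.toNat - 1)
        (s.1 * 10 ^ (d * (hi - s.2 + 1)).toNat + pchunk s.2 hi d, 10 ^ d.toNat))
      ((0 : Int), (0 : Int))).1

-- ===== PRECONDITION & SPEC =====
def Spec_printer (n : Int) (out : Int) : Prop := out = printer_alt n
instance (n : Int) (out : Int) : Decidable (Spec_printer n out) := by unfold Spec_printer; infer_instance

-- ===== CLAIM (what is proved, stated in full; the proofs are below) =====
def Claim_equal_printer : Prop := ∀ (n : Int), Dom_printer n → Spec_printer n (printer n)

-- ===== LEMMAS AND PROOFS =====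

-- number of decimal digits of a nonnegative integer (digits of 0 = 1)
def nd (i : Int) : Nat := Nat.log 10 i.toNat + 1

-- the specification fold: concatenate the decimal representations of the list's elements
def step (c i : Int) : Int := c * 10 ^ nd i + i

def conc (l : List Int) : Int := l.foldl step 0

-- --- decimal-length facts ---

lemma toDigitsCore_length_eq (f : Nat) : ∀ n : Nat, n < 10 ^ f → 0 < f →
    (Nat.toDigitsCore 10 f n []).length = Nat.log 10 n + 1 := by
  induction f with
  | zero => intro n _ h; omega
  | succ f ih =>
    intro n hn _
    simp only [Nat.toDigitsCore]
    by_cases h10 : n / 10 = 0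
    · have hlt10 : n < 10 := by omega
      simp [h10, Nat.log_eq_zero_iff.mpr (Or.inl hlt10)]
    · have hge : 10 ≤ n := by
        by_contra hlt
        exact h10 (Nat.div_eq_of_lt (by omega))
      have hfpos : 0 < f := by
        by_contra hf
        have hf0 : f = 0 := by omega
        subst hf0
        simp at hn
        omega
      have hlt : n / 10 < 10 ^ f := Nat.nat_repr_len_aux n 10 f (by norm_num) hn
      simp only [h10, if_false]
      rw [Nat.toDigitsCore_lens_eq, ih (n / 10) hlt hfpos]
      have hlogpos : 0 < Nat.log 10 n := Nat.log_pos (by norm_num) hge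
      have hdiv := Nat.log_div_base 10 n
      omega

lemma toDigits_length_eq (n : Nat) : (Nat.toDigits 10 n).length = Nat.log 10 n + 1 := by
  have hlt : n < 10 ^ (n + 1) :=
    lt_of_lt_of_le (Nat.lt_pow_self (by norm_num))
      (Nat.pow_le_pow_right (by norm_num) (by omega))
  exact toDigitsCore_length_eq (n + 1) n hlt (by omega)

lemma len_toStr (n : Int) (hn : 0 ≤ n) :
    PySem.Str.len (PySem.Int.toStr n) = (nd n : Int) := by
  rw [PySem.Str.len_eq, PySem.Int.toList_toStr]
  unfold PySem.Int.toChars nd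
  rw [if_neg (by omega)]
  exact_mod_cast congrArg (Nat.cast (R := Int)) (toDigits_length_eq n.toNat)

lemma lt_pow_nd (i : Int) (h : 0 ≤ i) : i < 10 ^ nd i := by
  have hx := Nat.lt_pow_succ_log_self (b := 10) (by norm_num) i.toNat
  rw [Nat.succ_eq_add_one] at hx
  unfold nd
  have hcast : ((10:Nat) ^ (Nat.log 10 i.toNat + 1) : Int) = (10:Int) ^ (Nat.log 10 i.toNat + 1) := by
    push_cast; ring
  omega

lemma pow_nd_pred_le (i : Int) (h : 1 ≤ i) : 10 ^ (nd i - 1) ≤ i := by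
  have hx := Nat.pow_log_le_self 10 (x := i.toNat) (by omega)
  unfold nd
  simp only [Nat.add_sub_cancel]
  have hcast : ((10:Nat) ^ Nat.log 10 i.toNat : Int) = (10:Int) ^ Nat.log 10 i.toNat := by
    push_cast; ring
  omega

lemma nd_eq_of_bounds (i : Int) (d : Nat) (hlo : 10 ^ (d - 1) ≤ i ∨ (d = 1 ∧ 0 ≤ i))
    (hhi : i < 10 ^ d) (hd : 1 ≤ d) : nd i = d := by
  have hnn : 0 ≤ i := by
    rcases hlo with h | ⟨_, h⟩
    · have hp : (0:Int) < 10 ^ (d - 1) := by positivity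
      omega
    · exact h
  unfold nd
  have hcastd : ((10:Nat) ^ d : Int) = (10:Int) ^ d := by push_cast; ring
  have hlog : Nat.log 10 i.toNat = d - 1 := by
    by_cases hd1 : d = 1
    · subst hd1
      apply Nat.log_eq_zero_iff.mpr
      left
      simp at hcastd
      omega
    · rcases hlo with h | ⟨h1, _⟩
      · apply Nat.log_eq_of_pow_le_of_lt_pow
        · have hcast : ((10:Nat) ^ (d - 1) : Int) = (10:Int) ^ (d - 1) := by push_cast; ring
          omega
        · have hd' : d - 1 + 1 = d := by omega
          rw [hd']
          omega
      · exact absurd h1 hd1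
  omega

-- --- fold-shift lemmas ---

lemma foldl_step_shift (l : List Int) : ∀ c : Int,
    l.foldl step c = c * 10 ^ ((l.map nd).sum) + l.foldl step 0 := by
  induction l with
  | nil => intro c; simp
  | cons x t ih =>
    intro c
    simp only [List.foldl_cons, List.map_cons, List.sum_cons]
    rw [ih (step c x), ih (step 0 x), pow_add]
    unfold step
    ring

lemma conc_append (l₁ l₂ : List Int) :
    conc (l₁ ++ l₂) = conc l₁ * 10 ^ ((l₂.map nd).sum) + conc l₂ := by
  unfold conc
  rw [List.foldl_append, foldl_step_shift l₂ (l₁.foldl step 0)]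

lemma foldl_width_shift (w : Nat) (l : List Int) : ∀ c : Int,
    l.foldl (fun c i => c * 10 ^ w + i) c
      = c * 10 ^ (w * l.length) + l.foldl (fun c i => c * 10 ^ w + i) 0 := by
  induction l with
  | nil => intro c; simp
  | cons x t ih =>
    intro c
    simp only [List.foldl_cons, List.length_cons]
    rw [ih (c * 10 ^ w + x), ih (0 * 10 ^ w + x), Nat.mul_succ, pow_add]
    ring

lemma toNat_mul_sub (d : Nat) (a b : Int) (h : a ≤ b) :
    ((d : Int) * (b - a)).toNat = d * (b - a).toNat := by
  have hcast : ((d : Int) * (b - a)) = ((d * (b - a).toNat : Nat) : Int) := by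
    push_cast
    rw [Int.toNat_of_nonneg (by omega)]
  rw [hcast, Int.toNat_natCast]

lemma pchunk_eq_fold (d : Nat) : ∀ (k : Nat) (a b : Int), 0 ≤ a → a ≤ b →
    (b - a).toNat = k →
    pchunk a b d = (PySem.List.pyRange a (b + 1) 1).foldl (fun c i => c * 10 ^ d + i) 0 := by
  intro k
  induction k using Nat.strong_induction_on with
  | _ k ih =>
    intro a b ha hab hk
    rw [pchunk]
    by_cases hba : b ≤ a
    · have hab' : a = b := le_antisymm hab hba
      subst hab'
      rw [if_pos le_rfl, PySem.List.pyRange_one_singleton]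
      simp
    · rw [if_neg hba]
      have hlt : a < b := lt_of_le_of_ne hab (fun h => hba (le_of_eq h.symm))
      simp only [PySem.Int.floordiv_eq_ediv_of_pos (show (0:Int) < 2 by omega)]
      set m : Int := (a + b) / 2 with hmdef
      have hm1 : a ≤ m := by omega
      have hm2 : m < b := by omega
      have hsplit : PySem.List.pyRange a (b + 1) 1
          = PySem.List.pyRange a (m + 1) 1 ++ PySem.List.pyRange (m + 1) (b + 1) 1 :=
        PySem.List.pyRange_one_append a (m + 1) (b + 1) (by omega) (by omega)
      rw [hsplit, List.foldl_append]
      rw [← ih (m - a).toNat (by omega) a m ha hm1 rfl]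
      rw [foldl_width_shift, ← ih (b - (m + 1)).toNat (by omega) (m + 1) b (by omega) (by omega) rfl]
      rw [PySem.List.length_pyRange_one]
      have hlen : (b + 1 - (m + 1)).toNat = (b - m).toNat := by omega
      rw [hlen, toNat_mul_sub d m b (by omega)]

lemma conc_snoc (l : List Int) (i : Int) :
    conc (l ++ [i]) = conc l * 10 ^ nd i + i := by
  rw [conc_append]
  simp [conc, step]

-- A's loop computes conc, keeping base = 10 ^ (digits of the last processed element)
lemma loopA_eq (m : Nat) :
    (PySem.List.pyRange 0 ((m : Int) + 1) 1).foldl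
      (fun (s : Int × Int) i =>
        let base : Int := if PySem.Int.mod i s.2 = 0 then s.2 * 10 else s.2
        (s.1 * base + i, base)) ((0 : Int), (1 : Int))
    = (conc (PySem.List.pyRange 0 ((m : Int) + 1) 1), 10 ^ nd m) := by
  induction m with
  | zero => decide
  | succ m ih =>
    have hc : ((m + 1 : Nat) : Int) = (m : Int) + 1 := by push_cast; ring
    rw [hc, PySem.List.pyRange_one_succ_right (by omega), List.foldl_append, ih]
    simp only [List.foldl_cons, List.foldl_nil]
    have hposbase : (0:Int) < 10 ^ nd m := by positivity
    have hle : (m : Int) + 1 ≤ 10 ^ nd (m : Int) := by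
      have := lt_pow_nd (m : Int) (by omega)
      omega
    by_cases heq : (m : Int) + 1 = 10 ^ nd (m : Int)
    · -- rollover: m+1 is a power of ten
      have hmod : PySem.Int.mod ((m : Int) + 1) (10 ^ nd (m : Int)) = 0 := by
        rw [PySem.Int.mod_eq_emod_of_pos hposbase, heq, Int.emod_self]
      have hnd1 : nd ((m : Int) + 1) = nd (m : Int) + 1 := by
        apply nd_eq_of_bounds
        · left
          simp only [Nat.add_sub_cancel]
          omega
        · have : (10:Int) ^ (nd (m:Int) + 1) = 10 ^ nd (m:Int) * 10 := by ring
          omega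
        · omega
      rw [conc_snoc, hnd1]
      rw [if_pos hmod, pow_succ]
    · -- same width: m+1 < 10^(nd m)
      have hlt : (m : Int) + 1 < 10 ^ nd (m : Int) := lt_of_le_of_ne hle heq
      have hmod : PySem.Int.mod ((m : Int) + 1) (10 ^ nd (m : Int)) ≠ 0 := by
        rw [PySem.Int.mod_eq_emod_of_pos hposbase, Int.emod_eq_of_lt (by omega) hlt]
        omega
      have hnd1 : nd ((m : Int) + 1) = nd (m : Int) := by
        apply nd_eq_of_bounds
        · by_cases hm0 : m = 0
          · right; constructor
            · subst hm0; simp [nd]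
            · omega
          · left
            have := pow_nd_pred_le (m : Int) (by omega)
            omega
        · exact hlt
        · simp [nd]
      rw [conc_snoc, hnd1, if_neg hmod]

-- B's loop invariant: after widths 1..K+1, total = conc(0 .. min n (10^(K+1) - 1)), lo = 10^(K+1)
lemma loopB_eq (n : Int) (hn : 0 ≤ n) : ∀ (K : Nat), (K = 0 ∨ 10 ^ K ≤ n) →
    (PySem.List.pyRange 1 (((K : Int) + 1) + 1) 1).foldl
      (fun (s : Int × Int) d =>
        let hi := min n (10 ^ d.toNat - 1)
        (s.1 * 10 ^ (d * (hi - s.2 + 1)).toNat + pchunk s.2 hi d, 10 ^ d.toNat))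
      ((0 : Int), (0 : Int))
    = (conc (PySem.List.pyRange 0 (min n (10 ^ (K + 1) - 1) + 1) 1), 10 ^ (K + 1)) := by
  intro K
  induction K with
  | zero =>
    intro _
    rw [show ((0 : Nat) : Int) + 1 + 1 = (1 : Int) + 1 by norm_num,
      PySem.List.pyRange_one_singleton]
    simp only [List.foldl_cons, List.foldl_nil, Int.toNat_one, pow_one]
    norm_num
    set hi := min n 9 with hhidef
    have hhi0 : 0 ≤ hi := by omega
    have hpc := pchunk_eq_fold 1 (hi - 0).toNat 0 hi (by omega) (by omega) rfl
    push_cast at hpc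
    rw [hpc]
    have hcongr : (PySem.List.pyRange 0 (hi + 1) 1).foldl (fun c i => c * 10 + i) 0
        = (PySem.List.pyRange 0 (hi + 1) 1).foldl step 0 := by
      apply PySem.List.foldl_congr_mem
      intro acc x hx
      rw [PySem.List.mem_pyRange_one] at hx
      have hndx : nd x = 1 := nd_eq_of_bounds x 1 (Or.inr ⟨rfl, by omega⟩) (by omega) le_rfl
      simp [step, hndx]
    rw [hcongr]
    rfl
  | succ K ih =>
    intro hlo
    have h10L : 10 ^ (K + 1) ≤ n := by
      rcases hlo with h | h
      · omega
      · exact h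
    have hih := ih (Or.inr (le_trans
      (pow_le_pow_right₀ (by norm_num : (1:Int) ≤ 10) (by omega)) h10L))
    have hcast : ((K + 1 : Nat) : Int) + 1 + 1 = (((K : Int) + 1) + 1) + 1 := by push_cast; ring
    rw [hcast, PySem.List.pyRange_one_succ_right (by omega), List.foldl_append, hih]
    simp only [List.foldl_cons, List.foldl_nil]
    have htoNat : ((K : Int) + 1 + 1).toNat = K + 1 + 1 := by omega
    rw [htoNat]
    have hpow : (0:Int) < 10 ^ (K + 1 + 1) := by positivity
    have hpowL : (0:Int) < 10 ^ (K + 1) := by positivity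
    have hpow_succ : (10:Int) ^ (K + 1 + 1) = 10 ^ (K + 1) * 10 := by ring
    set hi := min n (10 ^ (K + 1 + 1) - 1) with hhidef
    have hhi1 : 10 ^ (K + 1) ≤ hi := by
      have : (10:Int) ^ (K + 1) ≤ 10 ^ (K + 1 + 1) - 1 := by omega
      omega
    have hhi2 : hi < 10 ^ (K + 1 + 1) := by omega
    have hminL : min n ((10:Int) ^ (K + 1) - 1) = 10 ^ (K + 1) - 1 := by omega
    rw [hminL]
    have hprev : (10:Int) ^ (K + 1) - 1 + 1 = 10 ^ (K + 1) := by ring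
    rw [hprev]
    have hsplit : PySem.List.pyRange 0 (hi + 1) 1
        = PySem.List.pyRange 0 (10 ^ (K + 1)) 1 ++ PySem.List.pyRange (10 ^ (K + 1)) (hi + 1) 1 :=
      PySem.List.pyRange_one_append 0 (10 ^ (K + 1)) (hi + 1) (by omega) (by omega)
    simp only [Prod.mk.injEq]
    refine ⟨?_, trivial⟩
    -- total component
    rw [hsplit, conc_append]
    have hsum : ((PySem.List.pyRange (10 ^ (K + 1)) (hi + 1) 1).map nd).sum
        = (K + 1 + 1) * (hi + 1 - 10 ^ (K + 1)).toNat := by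
      have hconst : ((PySem.List.pyRange (10 ^ (K + 1)) (hi + 1) 1).map nd).sum
          = ((PySem.List.pyRange (10 ^ (K + 1)) (hi + 1) 1).map (fun _ => K + 1 + 1)).sum := by
        apply congrArg
        apply List.map_congr_left
        intro x hx
        rw [PySem.List.mem_pyRange_one] at hx
        exact nd_eq_of_bounds x (K + 1 + 1)
          (Or.inl (by simpa using hx.1)) (by omega) (by omega)
      rw [hconst, List.map_const', List.sum_replicate, smul_eq_mul,
        PySem.List.length_pyRange_one]
      ring
    rw [hsum]
    have hchunk : pchunk (10 ^ (K + 1)) hi ((K : Int) + 1 + 1)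
        = conc (PySem.List.pyRange (10 ^ (K + 1)) (hi + 1) 1) := by
      have hL1 : ((K : Int) + 1 + 1) = ((K + 1 + 1 : Nat) : Int) := by push_cast; ring
      rw [hL1, pchunk_eq_fold (K + 1 + 1) (hi - 10 ^ (K + 1)).toNat (10 ^ (K + 1)) hi
        (by omega) (by omega) rfl]
      apply PySem.List.foldl_congr_mem
      intro acc x hx
      rw [PySem.List.mem_pyRange_one] at hx
      have hndx : nd x = K + 1 + 1 :=
        nd_eq_of_bounds x (K + 1 + 1) (Or.inl (by simpa using hx.1)) (by omega) (by omega)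
      simp [step, hndx]
    rw [hchunk]
    have hexp : (((K : Int) + 1 + 1) * (hi - 10 ^ (K + 1) + 1)).toNat
        = (K + 1 + 1) * (hi + 1 - 10 ^ (K + 1)).toNat := by
      have hL1 : ((K : Int) + 1 + 1) = ((K + 1 + 1 : Nat) : Int) := by push_cast; ring
      have h1 : hi - 10 ^ (K + 1) + 1 = hi + 1 - 10 ^ (K + 1) := by ring
      rw [hL1, h1, toNat_mul_sub (K + 1 + 1) (10 ^ (K + 1)) (hi + 1) (by omega)]
    rw [hexp]

-- ===== VERDICT (by name: the statement is the Claim_ definition above) =====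
theorem printer_spec : Claim_equal_printer := by
  intro n _
  unfold Spec_printer printer printer_alt
  by_cases hn : n < 0
  · rw [if_pos hn, PySem.List.pyRange_one_eq_nil (by omega)]
    rfl
  · rw [not_lt] at hn
    rw [if_neg (by omega)]
    obtain ⟨m, hm⟩ : ∃ m : Nat, n = (m : Int) := ⟨n.toNat, by omega⟩
    subst hm
    rw [loopA_eq m]
    rw [len_toStr (m : Int) (by omega)]
    have hnd1 : 1 ≤ nd (m : Int) := by simp [nd]
    have hKdef : ((nd (m : Int) - 1 : Nat) : Int) + 1 = (nd (m : Int) : Int) := by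
      omega
    have hKnd : nd (m : Int) - 1 + 1 = nd (m : Int) := by omega
    have hloB := loopB_eq (m : Int) (by omega) (nd (m : Int) - 1) (by
      by_cases hm0 : m = 0
      · left; subst hm0; decide
      · right
        have h1 := pow_nd_pred_le (m : Int) (by omega)
        exact h1)
    rw [hKnd] at hloB
    rw [show ((nd (m : Int) : Int) + 1) = (((nd (m : Int) - 1 : Nat) : Int) + 1) + 1 by rw [hKdef]]
    rw [hloB]
    have hmin : min ((m : Int)) ((10:Int) ^ nd (m : Int) - 1) = (m : Int) := by
      have := lt_pow_nd (m : Int) (by omega)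
      omega
    rw [hmin]
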